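/- GENERATED by mk_final_copies.py from the proof of the farm's unit `vorbis_decode_packet_rest.11` (farm:vorbis_decode_packet_rest.11.3: Proof.lean) as the
   re-elaboration sweep compiled it — do not edit. -/
import Asan.CheckWalk
import Vorbis.Spec.PacketRestFrame
import Vorbis.Spec.PacketRestTest
import Vorbis.Spec.Units.vorbis_decode_packet_rest_11
import Vorbis.Spec.Worked.vorbis_decode_packet_rest_11_Lemmas

open X86 X86.User Asan Vorbis Vorbis.Spec Vorbis.Spec.vorbis_decode_packet_rest

set_option maxRecDepth 4000
set_option maxHeartbeats 4000000

namespace Vorbis.Spec.vorbis_decode_packet_rest_11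

/-- **One round of the channel loop** (0x111886 … 0x111883): from the head with counter `i` the machine reaches the entry of segment
.12 (`i ≥ C`, 0x111892 `jle`) or the head again with `i + 1`, through `do_floor` (`really_zero_channel[i] = 0`) or `memset`
(otherwise). The only stores are return addresses and `push 0` below the steady rsp, and the callee's stores into
`channel_buffers[i]`: `Stable` is carried by `stable_step`. -/
theorem floorRound (Lay : Layout) (hLay : Lay.hi = 0x1000000) (μ : Microarch) (hμ : UserX.MicroOK μ) (u₀ : State)
    (hcode : HasCodeNat Lay u₀ Vorbis.L.vorbis_decode_packet_rest.entry Vorbis.Code.code_vorbis_decode_packet_rest.nat Vorbis.L.vorbis_decode_packet_rest.size)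
    (h_load8 : Asan.SmallCheck Lay μ Vorbis.WayInv (Vorbis.CodeOK u₀) [.rax, .rcx, .rdx] 8 Vorbis.L.__asan_load8_noabort.entry)
    (h_do_floor : ∀ (others : List Obj) (frames : List (Nat × FrameLayout)) (Blk : Block → Prop) (mi : Nat), Calls Lay μ Vorbis.WayInv (Vorbis.conv u₀) Vorbis.L.do_floor.entry (Vorbis.Spec.do_floor.spec others frames Blk mi))
    (h_load4 : Asan.SmallCheck Lay μ Vorbis.WayInv (Vorbis.CodeOK u₀) [.rax, .rcx, .rdx] 4 Vorbis.L.__asan_load4_noabort.entry)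
    (h_memset : ∀ (others : List Obj) (frames : List (Nat × FrameLayout)), Calls Lay μ Vorbis.WayInv (Vorbis.conv u₀) Vorbis.L.memset.entry (Vorbis.Spec.memset.spec others frames))
    (others : List Obj) (frames : List (Nat × FrameLayout)) (len : Nat) (Ar : Arena) (stored room : Int)
      (mode : Nat) (ysz : Nat → Nat) (e : State) (ret : Word) (i : Nat) (v : State)
    (hat : AtFloorHead u₀ others frames len Ar stored room mode ysz e ret i v) :
    ReachVia Lay μ Vorbis.WayInv v (fun w => At12 u₀ others frames len Ar stored room mode ysz e ret w ∨
      AtFloorHead u₀ others frames len Ar stored room mode ysz e ret (i + 1) w) := by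
  have he := hat.entry
  v_entry he
  have hst := hat.toStable
  have hfl := h_do_floor others (framesIn frames e) (RunBlk Ar len) (Mode.mapping v.mem (stb_vorbis.mode_config_at (fOf e) mode))
  have hms := h_memset others (framesIn frames e)
  -- the counter as a word
  have hd1 := hst.inv.config.header.HD1
  have hile := hat.i_le
  obtain ⟨x, hxi⟩ : ∃ x : Word, x = UInt64.ofNat i := ⟨_, rfl⟩
  have hx : x.toNat = i := by
    rw [hxi]
    exact toNat_addr i (by omega)
  have hsx := sext_small x (by omega)
  have hzx := zext_small x (by omega)
  -- where `*f` is
  have hobj : LiveIn others (framesIn frames e) (e.reg .rdi).toNat 1808 := hst.inv.objLive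
  have hfin : 0x100000 ≤ (e.reg .rdi).toNat ∧ (e.reg .rdi).toNat + 1808 ≤ 0xC00000 := by
    have := hst.inv.ok.inside _ hst.inv.ob1
    simp only [vblock, voff] at this
    exact this
  have hfoff : (e.reg .rdi).toNat + 1808 ≤ 0x700000 ∨ 0x800000 ≤ (e.reg .rdi).toNat := by
    have := hst.inv.objOff
    simp only [voff] at this
    exact this
  -- the present state under the walker's names
  have w_rip := hat.rip
  have hv_rsp : v.reg .rsp = e.reg .rsp - 3000 := hat.rsp
  have hv_rbx : v.reg .rbx = x := by
    rw [hxi]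
    exact hat.rbx
  have hv_rbp := hat.rbp
  have w_eq : Mem.EqOn Vorbis.L.textLo Vorbis.L.textHi u₀.mem v.mem := hat.code
  have hdf : v.flags .df = false := (show abiInv _ from hat.abi).1
  have hmx : v.mxcsr &&& 0x1F80 = 0x1F80 := (show abiInv _ from hat.abi).2
  have hsse := Vorbis.sseOK_of_abiInv hat.abi
  -- the loads: `f->channels`, the slots of `n` and `n2`
  obtain ⟨C, hC⟩ : ∃ C : Nat, v.mem.readLE (e.reg .rdi + 4) 4 = C := ⟨_, rfl⟩
  have ea4 : e.reg .rdi + 4 = addr ((e.reg .rdi).toNat + 4) := by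
    rw [← addr_add_lit, addr_toNat]
  have hch : stb_vorbis.channels v.mem (fOf e) = sint32 C := by
    rw [← hC, ea4]
    rfl
  have hCle : (C : Int) = stb_vorbis.channels v.mem (fOf e) ∧ C ≤ 16 := by
    have := sint32_cases C
    have hlt := Mem.readLE_lt' v.mem (e.reg .rdi + 4) 4
    rw [hC] at hlt
    omega
  obtain ⟨hCch, hC16⟩ := hCle
  have sn : v.mem.readLE (e.reg .rsp - 2920) 4 = nOf v.mem (fOf e) (mOf e) := by
    rw [← slot_addr (e.reg .rsp) 3000 0x50 2920 (by decide)]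
    exact hst.slot_n
  have sn2 : v.mem.readLE (e.reg .rsp - 2940) 4 = nOf v.mem (fOf e) (mOf e) / 2 := by
    rw [← slot_addr (e.reg .rsp) 3000 0x3c 2940 (by decide)]
    exact hst.slot_n2
  have hpre0 := hst.pre
  obtain ⟨hsh0, hinv0, hargs⟩ := hpre0
  have hmeq : mOf e = stb_vorbis.mode_config_at (fOf e) mode := hargs.m_eq
  have hm64 := mode_lt_64 hst
  have hmode : (mode : Int) < stb_vorbis.mode_count v.mem (fOf e) := by
    have hd0 : DecodeSame (fOf e) e.mem v.mem :=
      StoreOK.decodeSame hinv0.ok hinv0.ob1 hinv0.sep hst.same (footprint_storeOK hst.pre he_room)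
    have hme : ModeOK v.mem (fOf e) := hst.inv.fb.vorbis.mode
    have hme0 : ModeOK e.mem (fOf e) := hinv0.fb.vorbis.mode
    have := (hme0.transfer (hd0.sub (by decide))).MD1
    have e1 : stb_vorbis.mode_count v.mem (fOf e) = stb_vorbis.mode_count e.mem (fOf e) := by
      simp only [vacc, voff]
      exact (hd0.sub (by decide) : ObjEq ModeOK.wins e.mem (fOf e) v.mem (fOf e)).i32 480 (by decide)
    rw [e1]
    exact hargs.mode_lt
  have hnb := nOf_le hst.inv hmode
  rw [← hmeq] at hnb
  have hi16 : i ≤ 16 := by omega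
  have hshadow : ShadowInv others (framesIn frames e) (e.reg .rsp - 3000).toNat v.mem := hst.shadow
  generalize hN : nOf v.mem (fOf e) (mOf e) = N at sn sn2 hnb
  obtain ⟨hNb, hb8192, hbpos⟩ := hnb
  have hN8192 : N ≤ 8192 := by omega
  -- the two pointer loads `f->channel_buffers[i]`, `f->finalY[i]`, read through the return address of a check call
  have hcb : ∀ r : Nat, (v.mem.writeLE (e.reg .rsp - 3008) 8 r).readLE (e.reg .rdi + (x + 108) * 8 + 8) 8
      = stb_vorbis.channel_buffers v.mem (fOf e) i := by
    intro r
    have hd : (e.reg .rdi + (x + 108) * 8 + 8).toNat + 8 ≤ (e.reg .rsp - 3008).toNat ∨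
        (e.reg .rsp - 3008).toNat + 8 ≤ (e.reg .rdi + (x + 108) * 8 + 8).toNat := by
      rcases hfoff with h | h
      · left
        u_omega
      · right
        u_omega
    rw [Mem.readLE_writeLE_disjoint_noWrap _ _ _ _ _ _ (by unfold Mem.NoWrap; u_omega) (by unfold Mem.NoWrap; u_omega) hd]
    have ea : e.reg .rdi + (x + 108) * 8 + 8 = addr ((e.reg .rdi).toNat + 872 + 8 * i) := by
      apply UInt64.toNat_inj.mp
      rw [toNat_addr _ (by omega)]
      u_omega
    rw [ea]
    rfl
  have hfy : ∀ r : Nat, (v.mem.writeLE (e.reg .rsp - 3008) 8 r).readLE (e.reg .rdi + (x + 158) * 8) 8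
      = stb_vorbis.finalY v.mem (fOf e) i := by
    intro r
    have hd : (e.reg .rdi + (x + 158) * 8).toNat + 8 ≤ (e.reg .rsp - 3008).toNat ∨
        (e.reg .rsp - 3008).toNat + 8 ≤ (e.reg .rdi + (x + 158) * 8).toNat := by
      rcases hfoff with h | h
      · left
        u_omega
      · right
        u_omega
    rw [Mem.readLE_writeLE_disjoint_noWrap _ _ _ _ _ _ (by unfold Mem.NoWrap; u_omega) (by unfold Mem.NoWrap; u_omega) hd]
    have ea : e.reg .rdi + (x + 158) * 8 = addr ((e.reg .rdi).toNat + 1264 + 8 * i) := by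
      apply UInt64.toNat_inj.mp
      rw [toNat_addr _ (by omega)]
      u_omega
    rw [ea]
    rfl
  -- the same two loads when the walker has already resolved them through the return-address store
  have hcb0 : v.mem.readLE (e.reg .rdi + (x + 108) * 8 + 8) 8 = stb_vorbis.channel_buffers v.mem (fOf e) i := by
    have ea : e.reg .rdi + (x + 108) * 8 + 8 = addr ((e.reg .rdi).toNat + 872 + 8 * i) := by
      apply UInt64.toNat_inj.mp
      rw [toNat_addr _ (by omega)]
      u_omega
    rw [ea]
    rfl
  have hfy0 : v.mem.readLE (e.reg .rdi + (x + 158) * 8) 8 = stb_vorbis.finalY v.mem (fOf e) i := by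
    have ea : e.reg .rdi + (x + 158) * 8 = addr ((e.reg .rdi).toNat + 1264 + 8 * i) := by
      apply UInt64.toNat_inj.mp
      rw [toNat_addr _ (by omega)]
      u_omega
    rw [ea]
    rfl
  -- `n` and `n2` in the argument registers, as numbers
  have en : (BitVec.ofNat 32 (N / 2)).toNat = N / 2 := toNat_ofNat32 _ (by omega)
  have es : (Word.ofBV (BitVec.signExtend 64 (BitVec.ofNat 32 (N / 2)))).toNat = N / 2 := by
    rw [toNat_sext32 _ (by omega), en]
  have en' : (Word.ofBV (BitVec.ofNat 32 N)).toNat = N := by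
    rw [toNat_ofBV32, toNat_ofNat32 _ (by omega)]
  have ec : s32 (Word.ofBV (BitVec.ofNat 32 N)) = (N : Int) := by
    rw [s32_small _ (by omega), en']
  have hcbw := chanbuf_where hst.inv (c := i)
  have e0 : e.reg .rsp - 3000 + 0x0 = e.reg .rsp - 3000 := by grind
  have hsb : v.mem.readLE (e.reg .rsp - 3000) 8 = sbOf e := by
    rw [← e0]
    exact hat.slot_sb0
  have hv_r15 := hat.r15
  u_walk hcode [hμ.vendor, hsx, hzx] until [Vorbis.L.vorbis_decode_packet_rest.loop11, Vorbis.L.vorbis_decode_packet_rest.cut36] span [Vorbis.L.textLo, Vorbis.L.textHi] side (v_side)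
  case check_11188a =>
    have hun : ShadowUntouched v.mem s_11188a.mem := by v_untouched
    exact hobj.accSmall hst.shadow hun _ 4 (by decide) (by u_omega) (by u_omega)
  case check_11189f =>
    have hun : ShadowUntouched v.mem s_11189f.mem := by v_untouched
    exact Vorbis.check_small hshadow hun (rzc_mem others frames e) (by decide) (by simp only []; u_omega)
      (by simp only []; u_omega)
  case check_111844 =>
    have hun : ShadowUntouched v.mem s_111844.mem := by v_untouched
    exact hobj.accSmall hshadow hun _ 8 (by decide) (by u_omega) (by u_omega)
  case check_11185b =>
    have hun : ShadowUntouched v.mem s_11185b.mem := by v_untouched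
    exact hobj.accSmall hshadow hun _ 8 (by decide) (by u_omega) (by u_omega)
  case check_1118bf =>
    have hun : ShadowUntouched v.mem s_1118bf.mem := by v_untouched
    exact hobj.accSmall hshadow hun _ 8 (by decide) (by u_omega) (by u_omega)
  case call_inv => v_inv
  case call_inv => v_inv
  case pre_11187a =>
    -- do_floor's precondition (0x11187a): the invariant over the stack stores so far, the argument registers
    have hlt : (i : Int) < stb_vorbis.channels v.mem (fOf e) := by
      rw [toInt_ofNat_small C (by omega)] at hbr_111892
      have := s32_small x (by omega)
      simp only [s32] at this
      omega
    have hun : ShadowUntouched v.mem s_11187a.mem := by v_untouched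
    have hs1 : Mem.SameExcept [⟨(e.reg .rsp).toNat - 3024, (e.reg .rsp).toNat - 3000⟩] v.mem s_11187a.mem := by
      u_same
    have hw1 : ∀ w, w ∈ [(⟨(e.reg .rsp).toNat - 3024, (e.reg .rsp).toNat - 3000⟩ : Span)] →
        SpanOK11 v.mem (fOf e) w := by
      intro w hwm
      rw [List.mem_singleton.mp hwm]
      left
      simp only []
      omega
    have hsh : ShadowPre others (framesIn frames e) s_11187a := by
      refine ⟨(hshadow.untouched hun).lower ?_ ?_ ?_, hsh0.offText⟩
      · rw [w_rsp]
        u_omega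
      · rw [w_rsp]
        u_omega
      · rw [w_rsp]
        u_omega
    first | rw [hcb] at w_r8 | rw [hcb0] at w_r8 | skip
    first | rw [hfy] at w_r9 | rw [hfy0] at w_r9 | skip
    have hcbr := (hst.inv.ok.inside _ (hst.inv.config.m6 i hlt).1)
    have hfyr := (hst.inv.ok.inside _ (hst.inv.fy i hlt).1)
    simp only [] at hcbr hfyr
    refine floor_pre hst.inv hs1 hw1 hsh (by rw [w_rdi]) mode i hmode ?_ hlt ?_ ?_ ?_ ?_
    · rw [w_rsi, ← hmeq]
      exact hv_r15
    · rw [w_rdx, s32_small x (by omega), hx]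
    · rw [w_r8]
      exact toNat_addr _ (by omega)
    · rw [w_r9]
      exact toNat_addr _ (by omega)
    · rw [w_rcx]
      rw [ec]
      omega
  case pre_1118d7 =>
    -- memset's precondition (0x1118d7): `4·n2` bytes of the channel buffer, inside one live object
    have hlt : (i : Int) < stb_vorbis.channels v.mem (fOf e) := by
      rw [toInt_ofNat_small C (by omega)] at hbr_111892
      have := s32_small x (by omega)
      simp only [s32] at this
      omega
    have hun : ShadowUntouched v.mem s_1118d7.mem := by v_untouched
    have hsh : ShadowPre others (framesIn frames e) s_1118d7 := by
      refine ⟨(hshadow.untouched hun).lower ?_ ?_ ?_, hsh0.offText⟩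
      · rw [w_rsp]
        u_omega
      · rw [w_rsp]
        u_omega
      · rw [w_rsp]
        u_omega
    first | rw [hcb] at w_rdi | rw [hcb0] at w_rdi | skip
    have hcbr := (hst.inv.ok.inside _ (hst.inv.config.m6 i hlt).1)
    simp only [] at hcbr
    have erdi : (s_1118d7.reg .rdi).toNat = stb_vorbis.channel_buffers v.mem (fOf e) i := by
      rw [w_rdi]
      exact toNat_addr _ (by omega)
    have erdx : (s_1118d7.reg .rdx).toNat = 4 * (N / 2) := by
      rw [w_rdx, shl2_small _ (by omega), es]
    refine ⟨hsh, Or.inr ?_⟩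
    rw [erdi, erdx]
    exact (hst.inv.chanLive hlt hbpos).sub _ _ (Nat.le_refl _) (by omega)
  · -- the exit (0x111892 `jle`): `i ≥ C`, the entry of segment .12
    refine ReachVia.done (Or.inl ?_)
    have hs : Mem.SameExcept [⟨(e.reg .rsp).toNat - 3008, (e.reg .rsp).toNat - 3000⟩] v.mem s_111892.mem := by
      u_same
    have hw : ∀ w, w ∈ [(⟨(e.reg .rsp).toNat - 3008, (e.reg .rsp).toNat - 3000⟩ : Span)] → StepOK e v.mem w := by
      intro w hwm
      rw [List.mem_singleton.mp hwm]
      left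
      simp only []
      omega
    have hun : ShadowUntouched v.mem s_111892.mem := by v_untouched
    have habi : abiInv s_111892 := by v_inv
    have hst' := stable_step hst w_rsp w_eq habi hs hw hun
    refine ⟨hst', w_rip, ?_⟩
    show s_111892.mem.readLE (e.reg .rsp - 3000 + 0x0) 8 = sbOf e
    rw [e0, hs.readLE _ 8 (by u_omega) ?_]
    · exact hsb
    · intro w hwm
      rw [List.mem_singleton.mp hwm]
      right
      simp only []
      u_omega
  · -- after do_floor (0x11187f): `add rsp, 0x10 ; add ebx, 1`, back at the head with `i + 1`
    have hlt : (i : Int) < stb_vorbis.channels v.mem (fOf e) := by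
      rw [toInt_ofNat_small C (by omega)] at hbr_111892
      have := s32_small x (by omega)
      simp only [s32] at this
      omega
    have hcbr := (hst.inv.ok.inside _ (hst.inv.config.m6 i hlt).1)
    simp only [] at hcbr
    v_after_call w_rsp_11187a w_mem_11187a
    have e8 : (s_11187a.reg .r8).toNat = stb_vorbis.channel_buffers v.mem (fOf e) i := by
      rw [w_r8_11187a]
      first | rw [hcb] | rw [hcb0] | skip
      exact toNat_addr _ (by omega)
    have ecx : (s32 (s_11187a.reg .rcx) / 2).toNat = N / 2 := by
      rw [w_rcx_11187a, ec]
      omega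
    simp only [e8, ecx] at w_same
    have hs : Mem.SameExcept [⟨(e.reg .rsp).toNat - 3856, (e.reg .rsp).toNat - 3000⟩,
        ⟨stb_vorbis.channel_buffers v.mem (fOf e) i, stb_vorbis.channel_buffers v.mem (fOf e) i + 4 * (N / 2)⟩]
        v.mem s_11187ar.mem := by
      u_same
    have hun : ShadowUntouched v.mem s_11187ar.mem := by
      apply hs.eqOn
      intro w hwm
      simp only [List.mem_cons, List.mem_nil_iff, or_false] at hwm
      rcases hwm with rfl | rfl
      · right
        simp only []
        omega
      · right
        simp only []
        omega
    u_walk hcode [hμ.vendor, hsx, hzx] until [Vorbis.L.vorbis_decode_packet_rest.loop11, Vorbis.L.vorbis_decode_packet_rest.cut36] span [Vorbis.L.textLo, Vorbis.L.textHi] side (v_side)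
    refine ReachVia.done (Or.inr ?_)
    have hs' : Mem.SameExcept [⟨(e.reg .rsp).toNat - 3856, (e.reg .rsp).toNat - 3000⟩,
        ⟨stb_vorbis.channel_buffers v.mem (fOf e) i, stb_vorbis.channel_buffers v.mem (fOf e) i + 4 * (N / 2)⟩]
        v.mem s_111883.mem := by
      rw [w_mem]
      exact hs
    have hun' : ShadowUntouched v.mem s_111883.mem := by
      rw [w_mem]
      exact hun
    have habi : abiInv s_111883 := by v_inv
    have hw : ∀ w, w ∈ [(⟨(e.reg .rsp).toNat - 3856, (e.reg .rsp).toNat - 3000⟩ : Span),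
        ⟨stb_vorbis.channel_buffers v.mem (fOf e) i, stb_vorbis.channel_buffers v.mem (fOf e) i + 4 * (N / 2)⟩] →
        StepOK e v.mem w := by
      intro w hwm
      simp only [List.mem_cons, List.mem_nil_iff, or_false] at hwm
      rcases hwm with rfl | rfl
      · left
        simp only []
        omega
      · right
        refine ⟨i, hlt, Nat.le_refl _, ?_⟩
        simp only []
        omega
    have hst' := stable_step hst w_rsp w_eq habi hs' hw hun'
    have hk := obj_kept hst.inv hs' (fun w hwm => (hw w hwm).spanOK hst)
    refine ⟨hst', w_rip, ?_, ?_, ?_, ?_, ?_⟩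
    · rw [w_rbx]
      exact inc_small x i hx (by omega)
    · rw [channels_kept hk]
      omega
    · rw [w_kept .rbp rfl]
      exact hv_rbp
    · rw [w_kept .r15 rfl, hmeq, mapOf_kept hk mode hm64, ← hmeq]
      exact hat.r15
    · show s_111883.mem.readLE (e.reg .rsp - 3000 + 0x0) 8 = sbOf e
      rw [e0, hs'.readLE _ 8 (by u_omega) ?_]
      · exact hsb
      · intro w hwm
        have hcbw' := hcbw hlt
        simp only [List.mem_cons, List.mem_nil_iff, or_false] at hwm
        rcases hwm with rfl | rfl
        · right
          simp only []
          u_omega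
        · simp only []
          rcases hcbw' with h | h
          · right
            u_omega
          · left
            u_omega
  · -- after memset (0x1118dc): `jmp ; add ebx, 1`, back at the head with `i + 1`
    have hlt : (i : Int) < stb_vorbis.channels v.mem (fOf e) := by
      rw [toInt_ofNat_small C (by omega)] at hbr_111892
      have := s32_small x (by omega)
      simp only [s32] at this
      omega
    have hcbr := (hst.inv.ok.inside _ (hst.inv.config.m6 i hlt).1)
    simp only [] at hcbr
    v_after_call w_rsp_1118d7 w_mem_1118d7
    have edi : (s_1118d7.reg .rdi).toNat = stb_vorbis.channel_buffers v.mem (fOf e) i := by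
      rw [w_rdi_1118d7]
      first | rw [hcb] | rw [hcb0] | skip
      exact toNat_addr _ (by omega)
    have edx : (s_1118d7.reg .rdx).toNat = 4 * (N / 2) := by
      rw [w_rdx_1118d7, shl2_small _ (by omega), es]
    simp only [edi, edx] at w_same
    have hs : Mem.SameExcept [⟨(e.reg .rsp).toNat - 3856, (e.reg .rsp).toNat - 3000⟩,
        ⟨stb_vorbis.channel_buffers v.mem (fOf e) i, stb_vorbis.channel_buffers v.mem (fOf e) i + 4 * (N / 2)⟩]
        v.mem s_1118d7r.mem := by
      u_same
    have hun : ShadowUntouched v.mem s_1118d7r.mem := by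
      apply hs.eqOn
      intro w hwm
      simp only [List.mem_cons, List.mem_nil_iff, or_false] at hwm
      rcases hwm with rfl | rfl
      · right
        simp only []
        omega
      · right
        simp only []
        omega
    u_walk hcode [hμ.vendor, hsx, hzx] until [Vorbis.L.vorbis_decode_packet_rest.loop11, Vorbis.L.vorbis_decode_packet_rest.cut36] span [Vorbis.L.textLo, Vorbis.L.textHi] side (v_side)
    refine ReachVia.done (Or.inr ?_)
    have hs' : Mem.SameExcept [⟨(e.reg .rsp).toNat - 3856, (e.reg .rsp).toNat - 3000⟩,
        ⟨stb_vorbis.channel_buffers v.mem (fOf e) i, stb_vorbis.channel_buffers v.mem (fOf e) i + 4 * (N / 2)⟩]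
        v.mem s_111883.mem := by
      rw [w_mem]
      exact hs
    have hun' : ShadowUntouched v.mem s_111883.mem := by
      rw [w_mem]
      exact hun
    have habi : abiInv s_111883 := by v_inv
    have hw : ∀ w, w ∈ [(⟨(e.reg .rsp).toNat - 3856, (e.reg .rsp).toNat - 3000⟩ : Span),
        ⟨stb_vorbis.channel_buffers v.mem (fOf e) i, stb_vorbis.channel_buffers v.mem (fOf e) i + 4 * (N / 2)⟩] →
        StepOK e v.mem w := by
      intro w hwm
      simp only [List.mem_cons, List.mem_nil_iff, or_false] at hwm
      rcases hwm with rfl | rfl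
      · left
        simp only []
        omega
      · right
        refine ⟨i, hlt, Nat.le_refl _, ?_⟩
        simp only []
        omega
    have hst' := stable_step hst w_rsp w_eq habi hs' hw hun'
    have hk := obj_kept hst.inv hs' (fun w hwm => (hw w hwm).spanOK hst)
    refine ⟨hst', w_rip, ?_, ?_, ?_, ?_, ?_⟩
    · rw [w_rbx]
      exact inc_small x i hx (by omega)
    · rw [channels_kept hk]
      omega
    · rw [w_kept .rbp rfl]
      exact hv_rbp
    · rw [w_kept .r15 rfl, hmeq, mapOf_kept hk mode hm64, ← hmeq]
      exact hat.r15
    · show s_111883.mem.readLE (e.reg .rsp - 3000 + 0x0) 8 = sbOf e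
      rw [e0, hs'.readLE _ 8 (by u_omega) ?_]
      · exact hsb
      · intro w hwm
        have hcbw' := hcbw hlt
        simp only [List.mem_cons, List.mem_nil_iff, or_false] at hwm
        rcases hwm with rfl | rfl
        · right
          simp only []
          u_omega
        · simp only []
          rcases hcbw' with h | h
          · right
            u_omega
          · left
            u_omega

/-- **The channel loop**: from its head with counter `i` the machine reaches the entry of segment .12. Measure `17 − i`
(`AtFloorHead.i_le`, HD1: `channels ≤ 16`). -/
theorem floorLoop (Lay : Layout) (μ : Microarch) (u₀ : State)
    (others : List Obj) (frames : List (Nat × FrameLayout)) (len : Nat) (Ar : Arena) (stored room : Int)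
    (mode : Nat) (ysz : Nat → Nat) (e : State) (ret : Word)
    (hbody : ∀ (i : Nat) (v : State), AtFloorHead u₀ others frames len Ar stored room mode ysz e ret i v →
      ReachVia Lay μ Vorbis.WayInv v (fun w => At12 u₀ others frames len Ar stored room mode ysz e ret w ∨
        AtFloorHead u₀ others frames len Ar stored room mode ysz e ret (i + 1) w)) :
    ∀ (k i : Nat), i + k = 17 → ∀ v, AtFloorHead u₀ others frames len Ar stored room mode ysz e ret i v →
      ReachVia Lay μ Vorbis.WayInv v (fun w => At12 u₀ others frames len Ar stored room mode ysz e ret w) := by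
  intro k
  induction k with
  | zero =>
    intro i hi v hat
    have hd1 := hat.toStable.inv.config.header.HD1
    have hile := hat.i_le
    omega
  | succ k ih =>
    intro i hi v hat
    refine (hbody i v hat).trans ?_
    intro w hw
    rcases hw with a12 | ah
    · exact ReachVia.done a12
    · exact ih (i + 1) (by omega) w ah

end Vorbis.Spec.vorbis_decode_packet_rest_11

/-- Segment .11 of `vorbis_decode_packet_rest` (0x11181f … 0x1118dc, lines 3381–3385: the deferred floors): `At11` to `At12`,
by `toFloorHead`, then the channel loop `floorLoop` over `floorRound`. -/
theorem Vorbis.Spec.Worked.vorbis_decode_packet_rest_11_ok : Vorbis.Spec.vorbis_decode_packet_rest_11.Statement := by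
  unfold Vorbis.Spec.vorbis_decode_packet_rest_11.Statement
  intro Lay hLay μ hμ u₀ hcode h_load8 h_do_floor h_load4 h_memset
  unfold Vorbis.Spec.vorbis_decode_packet_rest.Seg11
  intro others frames len Ar stored room mode ysz e ret v hat
  refine (Vorbis.Spec.vorbis_decode_packet_rest_11.toFloorHead Lay hLay μ hμ u₀ hcode others frames len Ar stored room mode ysz e ret v
    hat).trans ?_
  intro w hw
  refine Vorbis.Spec.vorbis_decode_packet_rest_11.floorLoop Lay μ u₀ others frames len Ar stored room mode ysz e ret ?_ 17 0 rfl w hw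
  intro i v' hat'
  exact Vorbis.Spec.vorbis_decode_packet_rest_11.floorRound Lay hLay μ hμ u₀ hcode h_load8 h_do_floor h_load4 h_memset others frames
    len Ar stored room mode ysz e ret i v' hat'
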